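-- pv_equiv track=rewrite | github.com/ndopy/baekjoon-in-krafton-jungle | 백준/Bronze/30017. 치즈버거 만들기/치즈버거 만들기.py | solution
-- ===== SOURCE A (Python) =====
-- def solution(patty, cheese):
--     burger_count = 0
--
--     for i in range(1, cheese + 1):
--         # 패티는 치즈보다 항상 1개 많아야 한다.
--         if i + 1 <= patty:
--             burger_count = i + (i + 1)
--         else:
--             break
--
--     return burger_count
-- ===== SOURCE B (Python) =====
-- def solution(patty, cheese):
--     m = min(cheese, patty - 1)
--     return 2 * m + 1 if m >= 1 else 0
-- ===== Notes on version B (the rewrite author's own statement) =====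
-- stated objective: simpler
-- what changed: Replaced the loop over range(1, cheese+1) with the closed form m = min(cheese, patty-1) and 2*m+1 (0 if m < 1).
import Mathlib
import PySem

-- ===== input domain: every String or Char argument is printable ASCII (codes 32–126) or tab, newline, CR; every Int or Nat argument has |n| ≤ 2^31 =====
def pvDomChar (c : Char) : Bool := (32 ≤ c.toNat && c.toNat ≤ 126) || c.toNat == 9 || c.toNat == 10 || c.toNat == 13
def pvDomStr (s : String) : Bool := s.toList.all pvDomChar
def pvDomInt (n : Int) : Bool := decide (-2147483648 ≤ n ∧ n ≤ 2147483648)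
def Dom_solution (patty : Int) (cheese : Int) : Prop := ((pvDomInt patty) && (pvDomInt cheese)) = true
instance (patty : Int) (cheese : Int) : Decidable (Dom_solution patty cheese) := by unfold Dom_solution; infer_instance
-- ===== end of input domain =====

-- B replaces A's counting loop by the closed form min(cheese, patty-1); objective: simpler (O(1) vs a loop).

-- ===== PORT A =====
-- the for-loop with break: i runs over range(1, cheese+1) lazily (stop = cheese+1); acc = burger_count
def solutionLoop (patty : Int) (i stop acc : Int) : Int :=
  if h : i < stop then
    if i + 1 ≤ patty then solutionLoop patty (i + 1) stop (i + (i + 1)) else acc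
  else acc
termination_by (stop - i).toNat
decreasing_by omega

def solution (patty : Int) (cheese : Int) : Int :=
  solutionLoop patty 1 (cheese + 1) 0

-- ===== PORT B =====
def solution_alt (patty : Int) (cheese : Int) : Int :=
  let m := min cheese (patty - 1)
  if m ≥ 1 then 2 * m + 1 else 0

-- ===== PRECONDITION & SPEC =====
def Spec_solution (patty : Int) (cheese : Int) (out : Int) : Prop := out = solution_alt patty cheese
instance (patty : Int) (cheese : Int) (out : Int) : Decidable (Spec_solution patty cheese out) := by unfold Spec_solution; infer_instance

-- ===== CLAIM (what is proved, stated in full; the proofs are below) =====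
def Claim_equal_solution : Prop := ∀ (patty : Int) (cheese : Int), Dom_solution patty cheese → Spec_solution patty cheese (solution patty cheese)

-- ===== LEMMAS AND PROOFS =====
-- characterisation of A's loop over [a, b)
theorem solutionLoop_spec (patty : Int) : ∀ (n : Nat) (a b acc : Int), (b - a).toNat = n →
    solutionLoop patty a b acc =
      if a < b ∧ a + 1 ≤ patty then 2 * (min (b - 1) (patty - 1)) + 1 else acc := by
  intro n
  induction n with
  | zero =>
    intro a b acc h
    have hab : ¬ a < b := by omega
    rw [solutionLoop, dif_neg hab, if_neg (fun hc => hab hc.1)]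
  | succ n ih =>
    intro a b acc h
    have hab : a < b := by omega
    rw [solutionLoop, dif_pos hab]
    by_cases hp : a + 1 ≤ patty
    · rw [if_pos hp, ih (a + 1) b _ (by omega), if_pos (And.intro hab hp)]
      split_ifs with h2
      · rfl
      · rcases min_cases (b - 1) (patty - 1) with ⟨hm, _⟩ | ⟨hm, _⟩ <;> omega
    · rw [if_neg hp, if_neg (fun hc => hp hc.2)]

-- ===== VERDICT (by name: the statement is the Claim_ definition above) =====
theorem solution_spec : Claim_equal_solution := by
  intro patty cheese _
  unfold Spec_solution solution solution_alt
  rw [solutionLoop_spec patty (cheese + 1 - 1).toNat 1 (cheese + 1) 0 rfl]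
  simp only [min_def]
  split_ifs <;> omega
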